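-- pv_equiv track=rewrite | github.com/KimJonghoSNU/Abstraction_gap | src/run_round4_oracle.py | _compose_query_from_selected_keys
-- ===== SOURCE A (Python) =====
-- from typing import Dict, List, Sequence, Tuple
--
-- CATEGORY_ORDER = ["Theory", "Entity", "Example", "Other"]
--
-- def _ordered_doc_keys(docs: Dict[str, str]) -> List[str]:
--     known = [key for key in CATEGORY_ORDER if str((docs or {}).get(key, "")).strip()]
--     extra: List[str] = []
--     for key, val in (docs or {}).items():
--         key_s = str(key or "").strip()
--         if not key_s or key_s in CATEGORY_ORDER:
--             continue
--         if str(val or "").strip():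
--             extra.append(key_s)
--     return known + extra
--
-- def _compose_query_from_selected_keys(
--     original_query: str,
--     docs: Dict[str, str],
--     selected_keys: Sequence[str],
-- ) -> str:
--     selected = set(str(key or "").strip() for key in selected_keys if str(key or "").strip())
--     pieces: List[str] = []
--     for key in _ordered_doc_keys(docs):
--         if key not in selected:
--             continue
--         text = str((docs or {}).get(key, "")).strip()
--         if text:
--             pieces.append(text)
--     blob = "\n".join(pieces).strip()
--     if not blob:
--         return (original_query or "").strip()
--     return ((original_query or "") + " " + blob).strip()
-- ===== SOURCE B (Python) =====
-- from typing import Dict, List, Sequence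
--
-- CATEGORY_ORDER = ["Theory", "Entity", "Example", "Other"]
--
-- def _compose_query_from_selected_keys(
--     original_query: str,
--     docs: Dict[str, str],
--     selected_keys: Sequence[str],
-- ) -> str:
--     d = docs or {}
--     # One pass: collect a normalized key for every doc with non-empty text.
--     keys: List[str] = []
--     for key, val in d.items():
--         if not str(val or "").strip():
--             continue
--         if key in CATEGORY_ORDER:
--             keys.append(key)
--             continue
--         key_s = str(key or "").strip()
--         # a stripped key that collides with a category name is ambiguous; skip it
--         if key_s and key_s not in CATEGORY_ORDER:
--             keys.append(key_s)
--     # Stable sort: known categories first in their fixed order, other keys keep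
--     # insertion order behind them.
--     rank = {cat: i for i, cat in enumerate(CATEGORY_ORDER)}
--     keys.sort(key=lambda k: rank.get(k, len(CATEGORY_ORDER)))
--     selected = {str(key or "").strip() for key in selected_keys if str(key or "").strip()}
--     pieces = [t for t in (str(d.get(k, "")).strip() for k in keys if k in selected) if t]
--     blob = "\n".join(pieces).strip()
--     if not blob:
--         return (original_query or "").strip()
--     return ((original_query or "") + " " + blob).strip()
-- ===== Notes on version B (the rewrite author's own statement) =====
-- stated objective: alternative
-- what changed: A orders the keys in two phases (scan CATEGORY_ORDER probing the dict, then a second pass over the items collecting unknown keys); B makes one pass over the items collecting a normalized key per non-empty doc and then stably sorts the collected keys by a category-rank key (rank.get(k, len(CATEGORY_ORDER))), relying on sort stability for the insertion order of unknown keys.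
import Mathlib
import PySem

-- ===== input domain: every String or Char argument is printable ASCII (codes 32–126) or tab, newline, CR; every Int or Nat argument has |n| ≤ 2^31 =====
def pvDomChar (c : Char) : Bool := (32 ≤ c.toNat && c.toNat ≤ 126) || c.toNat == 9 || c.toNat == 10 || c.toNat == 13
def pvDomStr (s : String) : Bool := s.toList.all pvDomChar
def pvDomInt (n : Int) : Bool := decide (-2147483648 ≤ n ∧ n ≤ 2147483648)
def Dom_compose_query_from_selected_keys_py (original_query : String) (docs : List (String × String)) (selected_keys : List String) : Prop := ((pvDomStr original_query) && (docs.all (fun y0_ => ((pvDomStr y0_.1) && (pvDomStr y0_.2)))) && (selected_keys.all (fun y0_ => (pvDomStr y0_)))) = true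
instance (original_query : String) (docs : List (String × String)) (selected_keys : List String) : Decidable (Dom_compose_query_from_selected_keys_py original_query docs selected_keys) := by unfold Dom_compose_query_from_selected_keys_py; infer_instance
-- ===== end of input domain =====

-- B replaces A's two-phase key ordering (scan CATEGORY_ORDER with dict lookups, then a second
-- pass collecting the extra keys) by ONE pass over the items followed by a stable sort on a
-- category-rank key; objective: alternative algorithm of the same cost. Return value only (no mutation).

-- ===== PORT A =====
def pyCategoryOrder : List String := ["Theory", "Entity", "Example", "Other"]

-- Python helper _ordered_doc_keys
def ordered_doc_keys (d : PySem.Dict String String) : List String :=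
  let known := pyCategoryOrder.filter (fun key => PySem.Str.strip (d.getD key "") ≠ "")
  let extra := d.items.foldl (fun extra kv =>
      let key_s := PySem.Str.strip kv.1
      if key_s = "" ∨ key_s ∈ pyCategoryOrder then extra
      else if PySem.Str.strip kv.2 ≠ "" then extra ++ [key_s] else extra) []
  known ++ extra

-- the body of A's pieces loop
def pyPieceStep (selected : PySem.Set String) (d : PySem.Dict String String)
    (pieces : List String) (key : String) : List String :=
  if !(selected.contains key) then pieces
  else
    let text := PySem.Str.strip (d.getD key "")
    if text ≠ "" then pieces ++ [text] else pieces

def compose_query_from_selected_keys_py (original_query : String) (docs : List (String × String)) (selected_keys : List String) : String :=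
  let d := PySem.Dict.ofList docs
  let selected : PySem.Set String :=
    PySem.Set.ofList ((selected_keys.filter (fun key => PySem.Str.strip key ≠ "")).map (fun key => PySem.Str.strip key))
  let pieces := (ordered_doc_keys d).foldl (pyPieceStep selected d) []
  let blob := PySem.Str.strip (PySem.Str.join "\n" pieces)
  if blob = "" then PySem.Str.strip original_query
  else PySem.Str.strip (original_query ++ " " ++ blob)

-- ===== PORT B =====
-- rank = {cat: i for i, cat in enumerate(CATEGORY_ORDER)}
def pyRankDict : PySem.Dict String Int :=
  PySem.Dict.ofList ((PySem.List.enumerate pyCategoryOrder).map (fun p => (p.2, p.1)))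

-- the body of B's single collection loop over the items
def pyAltKeyStep (keys : List String) (kv : String × String) : List String :=
  if PySem.Str.strip kv.2 = "" then keys
  else if kv.1 ∈ pyCategoryOrder then keys ++ [kv.1]
  else if PySem.Str.strip kv.1 ≠ "" ∧ PySem.Str.strip kv.1 ∉ pyCategoryOrder then
    keys ++ [PySem.Str.strip kv.1]
  else keys

def compose_query_from_selected_keys_py_alt (original_query : String) (docs : List (String × String)) (selected_keys : List String) : String :=
  let d := PySem.Dict.ofList docs
  let keys := PySem.List.sorted (d.items.foldl pyAltKeyStep [])
      (fun k => pyRankDict.getD k (PySem.List.len pyCategoryOrder)) false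
  let selected : PySem.Set String :=
    PySem.Set.ofList ((selected_keys.filter (fun key => PySem.Str.strip key ≠ "")).map (fun key => PySem.Str.strip key))
  let pieces := ((keys.filter (fun k => selected.contains k)).map (fun k => PySem.Str.strip (d.getD k ""))).filter (fun t => t ≠ "")
  let blob := PySem.Str.strip (PySem.Str.join "\n" pieces)
  if blob = "" then PySem.Str.strip original_query
  else PySem.Str.strip (original_query ++ " " ++ blob)

-- ===== PRECONDITION & SPEC =====
def Spec_compose_query_from_selected_keys_py (original_query : String) (docs : List (String × String)) (selected_keys : List String) (out : String) : Prop := out = compose_query_from_selected_keys_py_alt original_query docs selected_keys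
instance (original_query : String) (docs : List (String × String)) (selected_keys : List String) (out : String) : Decidable (Spec_compose_query_from_selected_keys_py original_query docs selected_keys out) := by unfold Spec_compose_query_from_selected_keys_py; infer_instance

-- ===== CLAIM (what is proved, stated in full; the proofs are below) =====
def Claim_equal_compose_query_from_selected_keys_py : Prop := ∀ (original_query : String) (docs : List (String × String)) (selected_keys : List String), Dom_compose_query_from_selected_keys_py original_query docs selected_keys → Spec_compose_query_from_selected_keys_py original_query docs selected_keys (compose_query_from_selected_keys_py original_query docs selected_keys)

-- ===== LEMMAS AND PROOFS =====

theorem pyRankDict_eq : pyRankDict = PySem.Dict.mk [("Theory",0),("Entity",1),("Example",2),("Other",3)] := by decide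

-- the rank key B sorts by, written out
theorem pvRank_eq (s : String) :
    pyRankDict.getD s (PySem.List.len pyCategoryOrder) =
      if s = "Theory" then 0 else if s = "Entity" then 1 else if s = "Example" then 2
      else if s = "Other" then 3 else 4 := by
  by_cases h1 : s = "Theory"; · subst h1; decide
  by_cases h2 : s = "Entity"; · subst h2; decide
  by_cases h3 : s = "Example"; · subst h3; decide
  by_cases h4 : s = "Other"; · subst h4; decide
  rw [pyRankDict_eq]
  simp [PySem.Dict.getD_eq_get?_getD, Ne.symm h1, Ne.symm h2,
    Ne.symm h3, Ne.symm h4, h1, h2, h3, h4, PySem.Dict.get?]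
  decide

-- members of CATEGORY_ORDER are strip-fixed
theorem pvCat_strip_fixed (c : String) (hc : c ∈ pyCategoryOrder) : PySem.Str.strip c = c := by
  rcases (by simpa [pyCategoryOrder] using hc : c = "Theory" ∨ c = "Entity" ∨ c = "Example" ∨
    c = "Other") with h | h | h | h <;> subst h <;> decide

theorem pvCat_rank_ne_four (c : String) (hc : c ∈ pyCategoryOrder) :
    pyRankDict.getD c (PySem.List.len pyCategoryOrder) ≠ 4 := by
  rcases (by simpa [pyCategoryOrder] using hc : c = "Theory" ∨ c = "Entity" ∨ c = "Example" ∨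
    c = "Other") with h | h | h | h <;> subst h <;> decide

-- generic: an append-only foldl is acc ++ filterMap
theorem pvFoldl_append_opt {α β : Type} (step : List β → α → List β) (g : α → Option β)
    (hstep : ∀ acc x, step acc x = acc ++ (g x).toList) :
    ∀ (l : List α) (acc : List β), l.foldl step acc = acc ++ l.filterMap g := by
  intro l
  induction l with
  | nil => intro acc; simp
  | cons x l ih =>
      intro acc; rw [List.foldl_cons, hstep]
      cases hgx : g x <;> simp [ih, List.filterMap_cons, hgx]

-- stable insertion into a split list
theorem pvInsertBy_split {α : Type} (R : α → Int) (x : α) (A B : List α)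
    (hA : ∀ a ∈ A, ¬ (R x < R a)) (hB : ∀ b ∈ B, R x < R b) :
    PySem.List.insertBy (fun a b => decide (R a < R b)) x (A ++ B) = A ++ x :: B := by
  induction A with
  | nil =>
      cases B with
      | nil => simp [PySem.List.insertBy]
      | cons b B => simp [PySem.List.insertBy, hB b (by simp)]
  | cons a A ih =>
      have h1 : ¬ (R x < R a) := hA a (by simp)
      simp [PySem.List.insertBy, h1]
      exact ih (fun a' ha' => hA a' (by simp [ha']))

-- a stable sort by a 5-valued rank is the concatenation of the rank buckets
theorem pvSorted_buckets (R : String → Int) (xs : List String)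
    (h : ∀ x ∈ xs, R x = 0 ∨ R x = 1 ∨ R x = 2 ∨ R x = 3 ∨ R x = 4) :
    PySem.List.sorted xs R false =
      xs.filter (fun x => decide (R x = 0)) ++ xs.filter (fun x => decide (R x = 1)) ++
      xs.filter (fun x => decide (R x = 2)) ++ xs.filter (fun x => decide (R x = 3)) ++
      xs.filter (fun x => decide (R x = 4)) := by
  induction xs using List.reverseRecOn with
  | nil => rfl
  | append_singleton xs x ih =>
      have hxs : ∀ y ∈ xs, R y = 0 ∨ R y = 1 ∨ R y = 2 ∨ R y = 3 ∨ R y = 4 :=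
        fun y hy => h y (by simp [hy])
      have hme : ∀ (i : Int) (a : String), a ∈ xs.filter (fun x => decide (R x = i)) → R a = i :=
        fun i a ha => by simpa using (List.mem_filter.mp ha).2
      rw [PySem.List.sorted_eq_foldl_insertBy, List.foldl_append, List.foldl_cons, List.foldl_nil,
        ← PySem.List.sorted_eq_foldl_insertBy, ih hxs]
      rcases h x (by simp) with hx | hx | hx | hx | hx
      · have e := pvInsertBy_split R x
          (xs.filter (fun x => decide (R x = 0)))
          (xs.filter (fun x => decide (R x = 1)) ++ xs.filter (fun x => decide (R x = 2)) ++
           xs.filter (fun x => decide (R x = 3)) ++ xs.filter (fun x => decide (R x = 4)))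
          (fun a ha => by have := hme 0 a ha; omega)
          (by
            intro b hb
            simp only [List.mem_append] at hb
            rcases hb with ((hb | hb) | hb) | hb
            · have := hme 1 b hb; omega
            · have := hme 2 b hb; omega
            · have := hme 3 b hb; omega
            · have := hme 4 b hb; omega)
        simp only [List.append_assoc] at e ⊢
        rw [e]
        simp [List.filter_append, hx]
      · have e := pvInsertBy_split R x
          (xs.filter (fun x => decide (R x = 0)) ++ xs.filter (fun x => decide (R x = 1)))
          (xs.filter (fun x => decide (R x = 2)) ++
           xs.filter (fun x => decide (R x = 3)) ++ xs.filter (fun x => decide (R x = 4)))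
          (by
            intro a ha
            simp only [List.mem_append] at ha
            rcases ha with ha | ha
            · have := hme 0 a ha; omega
            · have := hme 1 a ha; omega)
          (by
            intro b hb
            simp only [List.mem_append] at hb
            rcases hb with (hb | hb) | hb
            · have := hme 2 b hb; omega
            · have := hme 3 b hb; omega
            · have := hme 4 b hb; omega)
        simp only [List.append_assoc] at e ⊢
        rw [e]
        simp [List.filter_append, hx]
      · have e := pvInsertBy_split R x
          (xs.filter (fun x => decide (R x = 0)) ++ xs.filter (fun x => decide (R x = 1)) ++
           xs.filter (fun x => decide (R x = 2)))
          (xs.filter (fun x => decide (R x = 3)) ++ xs.filter (fun x => decide (R x = 4)))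
          (by
            intro a ha
            simp only [List.mem_append] at ha
            rcases ha with (ha | ha) | ha
            · have := hme 0 a ha; omega
            · have := hme 1 a ha; omega
            · have := hme 2 a ha; omega)
          (by
            intro b hb
            simp only [List.mem_append] at hb
            rcases hb with hb | hb
            · have := hme 3 b hb; omega
            · have := hme 4 b hb; omega)
        simp only [List.append_assoc] at e ⊢
        rw [e]
        simp [List.filter_append, hx]
      · have e := pvInsertBy_split R x
          (xs.filter (fun x => decide (R x = 0)) ++ xs.filter (fun x => decide (R x = 1)) ++
           xs.filter (fun x => decide (R x = 2)) ++ xs.filter (fun x => decide (R x = 3)))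
          (xs.filter (fun x => decide (R x = 4)))
          (by
            intro a ha
            simp only [List.mem_append] at ha
            rcases ha with ((ha | ha) | ha) | ha
            · have := hme 0 a ha; omega
            · have := hme 1 a ha; omega
            · have := hme 2 a ha; omega
            · have := hme 3 a ha; omega)
          (fun b hb => by have := hme 4 b hb; omega)
        simp only [List.append_assoc] at e ⊢
        rw [e]
        simp [List.filter_append, hx]
      · have e := pvInsertBy_split R x
          (xs.filter (fun x => decide (R x = 0)) ++ xs.filter (fun x => decide (R x = 1)) ++
           xs.filter (fun x => decide (R x = 2)) ++ xs.filter (fun x => decide (R x = 3)) ++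
           xs.filter (fun x => decide (R x = 4))) []
          (by
            intro a ha
            simp only [List.mem_append] at ha
            rcases ha with (((ha | ha) | ha) | ha) | ha
            · have := hme 0 a ha; omega
            · have := hme 1 a ha; omega
            · have := hme 2 a ha; omega
            · have := hme 3 a ha; omega
            · have := hme 4 a ha; omega)
          (by simp)
        simp only [List.append_assoc, List.append_nil] at e ⊢
        rw [e]
        simp [List.filter_append, hx]

-- what one item contributes to B's key list
def pvPick (kv : String × String) : Option String :=
  if PySem.Str.strip kv.2 = "" then none
  else if kv.1 ∈ pyCategoryOrder then some kv.1
  else if PySem.Str.strip kv.1 ≠ "" ∧ PySem.Str.strip kv.1 ∉ pyCategoryOrder then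
    some (PySem.Str.strip kv.1)
  else none

-- what one item contributes to A's extra list
def pvPickA (kv : String × String) : Option String :=
  if PySem.Str.strip kv.1 = "" ∨ PySem.Str.strip kv.1 ∈ pyCategoryOrder then none
  else if PySem.Str.strip kv.2 ≠ "" then some (PySem.Str.strip kv.1) else none

theorem pvAltKeys_eq_filterMap (l : List (String × String)) :
    l.foldl pyAltKeyStep [] = l.filterMap pvPick := by
  have := pvFoldl_append_opt pyAltKeyStep pvPick (by
    intro acc kv
    simp only [pyAltKeyStep, pvPick]
    split_ifs <;> simp)
  simpa using this l []

theorem pvFilterMap_key_singleton (c : String) (q : String → Bool) :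
    ∀ (l : List (String × String)), (l.map (fun p => p.1)).Nodup →
    l.filterMap (fun p => if p.1 = c ∧ q p.2 = true then some c else none) =
      (match (PySem.Dict.mk l).get? c with
       | some v => if q v then [c] else []
       | none => []) := by
  intro l
  induction l with
  | nil => intro _; rfl
  | cons p l ih =>
      intro hnd
      simp only [List.map_cons, List.nodup_cons] at hnd
      obtain ⟨hh, ht⟩ := hnd
      rw [List.filterMap_cons, PySem.Dict.get?_mk_cons]
      by_cases hc : p.1 = c
      · have hnl : l.filterMap (fun p => if p.1 = c ∧ q p.2 = true then some c else none) = [] := by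
          rw [List.filterMap_eq_nil_iff]
          intro a ha
          have hne : a.1 ≠ c := fun h => hh (List.mem_map.mpr ⟨a, ha, h.trans hc.symm⟩)
          simp [hne]
        by_cases hq : q p.2 = true <;> simp [hc, hq, hnl]
      · simp [hc, ih ht]

-- pointwise: what pvPick contributes to a known-category bucket
theorem pvPick_filter_known (c : String) (hc : c ∈ pyCategoryOrder) (kv : String × String) :
    (pvPick kv).filter (fun y => decide (y = c)) =
      if kv.1 = c ∧ (decide (PySem.Str.strip kv.2 ≠ "")) = true then some c else none := by
  simp only [pvPick]
  by_cases h1 : PySem.Str.strip kv.2 = ""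
  · simp [h1, Option.filter]
  · by_cases h2 : kv.1 ∈ pyCategoryOrder
    · by_cases h3 : kv.1 = c
      · subst h3; simp [h1, h2, Option.filter]
      · simp [h1, h2, h3, Option.filter]
    · have hne : kv.1 ≠ c := fun h => h2 (h ▸ hc)
      by_cases h4 : PySem.Str.strip kv.1 ≠ "" ∧ PySem.Str.strip kv.1 ∉ pyCategoryOrder
      · have h5 : PySem.Str.strip kv.1 ≠ c := fun h => h4.2 (h ▸ hc)
        simp [h1, h2, h4, hne, h5, Option.filter]
      · simp [h1, h2, h4, hne, Option.filter]

-- a known-category bucket of B's key list is A's membership test on that category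
theorem pvBucket_known (d : PySem.Dict String String) (hnd : (d.items.map (fun p => p.1)).Nodup)
    (c : String) (hc : c ∈ pyCategoryOrder) :
    (d.items.filterMap pvPick).filter (fun s => decide (s = c)) =
      if PySem.Str.strip (d.getD c "") ≠ "" then [c] else [] := by
  rw [List.filter_filterMap]
  rw [List.filterMap_congr (fun kv _ => pvPick_filter_known c hc kv)]
  rw [pvFilterMap_key_singleton c (fun v => decide (PySem.Str.strip v ≠ "")) d.items hnd]
  have hd : PySem.Dict.mk d.items = d := rfl
  rw [hd, PySem.Dict.getD_eq_get?_getD]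
  cases hget : d.get? c with
  | none =>
      have he : PySem.Str.strip "" = "" := by decide
      simp [he]
  | some v => by_cases hv : PySem.Str.strip v ≠ "" <;> simp [hv]

-- the top (unknown-key) bucket of B's key list is A's extra list
theorem pvBucket_extra (d : PySem.Dict String String) :
    (d.items.filterMap pvPick).filter
        (fun s => decide (pyRankDict.getD s (PySem.List.len pyCategoryOrder) = 4)) =
      d.items.filterMap pvPickA := by
  rw [List.filter_filterMap]
  apply List.filterMap_congr
  intro kv _
  simp only [pvPick, pvPickA]
  by_cases h1 : PySem.Str.strip kv.2 = ""
  · rw [if_pos h1]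
    by_cases h0 : PySem.Str.strip kv.1 = "" ∨ PySem.Str.strip kv.1 ∈ pyCategoryOrder
    · rw [if_pos h0]; rfl
    · rw [if_neg h0, if_neg (by simp [h1])]; rfl
  · rw [if_neg h1]
    by_cases h2 : kv.1 ∈ pyCategoryOrder
    · rw [if_pos h2]
      have hsf : PySem.Str.strip kv.1 = kv.1 := pvCat_strip_fixed kv.1 h2
      have hmem : PySem.Str.strip kv.1 = "" ∨ PySem.Str.strip kv.1 ∈ pyCategoryOrder :=
        Or.inr (by rw [hsf]; exact h2)
      rw [if_pos hmem]
      have h4 := pvCat_rank_ne_four kv.1 h2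
      simp only [PySem.List.len_eq] at h4
      simp [Option.filter, h4]
    · rw [if_neg h2]
      by_cases h3 : PySem.Str.strip kv.1 ≠ "" ∧ PySem.Str.strip kv.1 ∉ pyCategoryOrder
      · rw [if_pos h3]
        have h4 : pyRankDict.getD (PySem.Str.strip kv.1) (PySem.List.len pyCategoryOrder) = 4 := by
          rw [pvRank_eq]
          have := h3.2
          simp only [pyCategoryOrder, List.mem_cons, List.not_mem_nil, or_false] at this
          push_neg at this
          simp [this.1, this.2.1, this.2.2.1, this.2.2.2]
        simp only [PySem.List.len_eq] at h4
        rw [if_neg (by rintro (h | h); exacts [h3.1 h, h3.2 h]), if_pos (by simp [h1])]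
        simp [Option.filter, h4]
      · rw [if_neg h3]
        push_neg at h3
        by_cases h5 : PySem.Str.strip kv.1 = ""
        · rw [if_pos (Or.inl h5)]; rfl
        · rw [if_pos (Or.inr (h3 h5))]; rfl

-- B's sorted key list is exactly A's ordered key list
theorem pvKeys_eq (d : PySem.Dict String String) (hnd : (d.items.map (fun p => p.1)).Nodup) :
    PySem.List.sorted (d.items.foldl pyAltKeyStep [])
        (fun k => pyRankDict.getD k (PySem.List.len pyCategoryOrder)) false =
      ordered_doc_keys d := by
  rw [pvAltKeys_eq_filterMap]
  rw [pvSorted_buckets _ _ (by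
    intro x _
    rw [pvRank_eq]
    split_ifs <;> simp)]
  have hb : ∀ (i : Int) (c : String),
      (∀ a : String, (decide (pyRankDict.getD a (PySem.List.len pyCategoryOrder) = i)) = decide (a = c)) →
      c ∈ pyCategoryOrder →
      (d.items.filterMap pvPick).filter
          (fun s => decide (pyRankDict.getD s (PySem.List.len pyCategoryOrder) = i)) =
        if PySem.Str.strip (d.getD c "") ≠ "" then [c] else [] := by
    intro i c hiff hc
    rw [List.filter_congr (fun a _ => hiff a)]
    exact pvBucket_known d hnd c hc
  rw [hb 0 "Theory" (fun a => by rw [pvRank_eq]; split_ifs <;> simp_all) (by decide),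
      hb 1 "Entity" (fun a => by rw [pvRank_eq]; split_ifs <;> simp_all) (by decide),
      hb 2 "Example" (fun a => by rw [pvRank_eq]; split_ifs <;> simp_all) (by decide),
      hb 3 "Other" (fun a => by rw [pvRank_eq]; split_ifs <;> simp_all) (by decide),
      pvBucket_extra d]
  unfold ordered_doc_keys
  have hextra : d.items.foldl (fun extra kv =>
      let key_s := PySem.Str.strip kv.1
      if key_s = "" ∨ key_s ∈ pyCategoryOrder then extra
      else if PySem.Str.strip kv.2 ≠ "" then extra ++ [key_s] else extra) [] =
      d.items.filterMap pvPickA := by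
    have := pvFoldl_append_opt (fun extra kv =>
      let key_s := PySem.Str.strip kv.1
      if key_s = "" ∨ key_s ∈ pyCategoryOrder then extra
      else if PySem.Str.strip kv.2 ≠ "" then extra ++ [key_s] else extra) pvPickA (by
      intro acc kv
      simp only [pvPickA]
      split_ifs <;> simp) d.items []
    simpa using this
  rw [hextra]
  have hknown : pyCategoryOrder.filter (fun key => PySem.Str.strip (d.getD key "") ≠ "") =
      (if PySem.Str.strip (d.getD "Theory" "") ≠ "" then ["Theory"] else []) ++
      (if PySem.Str.strip (d.getD "Entity" "") ≠ "" then ["Entity"] else []) ++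
      (if PySem.Str.strip (d.getD "Example" "") ≠ "" then ["Example"] else []) ++
      (if PySem.Str.strip (d.getD "Other" "") ≠ "" then ["Other"] else []) := by
    simp only [pyCategoryOrder, List.filter_cons, List.filter_nil, decide_eq_true_eq]
    split_ifs <;> simp
  rw [hknown]

-- what one key contributes to the pieces
def pvPieceOpt (selected : PySem.Set String) (d : PySem.Dict String String) (key : String) : Option String :=
  if !(selected.contains key) then none
  else if PySem.Str.strip (d.getD key "") ≠ "" then some (PySem.Str.strip (d.getD key "")) else none

theorem pvPiecesA_eq (selected : PySem.Set String) (d : PySem.Dict String String) (ks : List String) :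
    ks.foldl (pyPieceStep selected d) [] = ks.filterMap (pvPieceOpt selected d) := by
  have := pvFoldl_append_opt (pyPieceStep selected d) (pvPieceOpt selected d) (by
    intro acc key
    simp only [pyPieceStep, pvPieceOpt]
    split_ifs <;> simp) ks []
  simpa using this

theorem pvChainGeneric {α β : Type} (p : α → Bool) (f : α → β) (q : β → Bool) (ks : List α) :
    ((ks.filter p).map f).filter q =
      ks.filterMap (fun k => if p k then (if q (f k) then some (f k) else none) else none) := by
  induction ks with
  | nil => rfl
  | cons k ks ih =>
      cases hp : p k <;> cases hq : q (f k) <;>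
        simp [List.filter_cons, List.filterMap_cons, hp, hq, ih]

theorem pvPiecesB_eq (selected : PySem.Set String) (d : PySem.Dict String String) (ks : List String) :
    ((ks.filter (fun k => selected.contains k)).map (fun k => PySem.Str.strip (d.getD k ""))).filter
        (fun t => t ≠ "") = ks.filterMap (pvPieceOpt selected d) := by
  rw [pvChainGeneric (fun k => selected.contains k) (fun k => PySem.Str.strip (d.getD k ""))
    (fun t => t ≠ "") ks]
  apply List.filterMap_congr
  intro k _
  simp only [pvPieceOpt]
  cases hc : selected.contains k <;> simp [hc]

theorem pvMain (original_query : String) (docs : List (String × String)) (selected_keys : List String) :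
    compose_query_from_selected_keys_py original_query docs selected_keys =
      compose_query_from_selected_keys_py_alt original_query docs selected_keys := by
  have hnd : ((PySem.Dict.ofList docs).items.map (fun p => p.1)).Nodup := by
    simpa [PySem.Dict.keys] using PySem.Dict.nodup_keys_ofList docs
  simp only [compose_query_from_selected_keys_py, compose_query_from_selected_keys_py_alt]
  rw [pvKeys_eq _ hnd, pvPiecesA_eq, pvPiecesB_eq]

-- ===== VERDICT (by name: the statement is the Claim_ definition above) =====
theorem compose_query_from_selected_keys_py_spec : Claim_equal_compose_query_from_selected_keys_py := by
  intro original_query docs selected_keys _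
  unfold Spec_compose_query_from_selected_keys_py
  exact pvMain original_query docs selected_keys
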